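-- pv_equiv track=rewrite | github.com/miczek2309/logia | suma_wrzystkich_liczb.py | suma_wrzystkich_liczb
-- ===== SOURCE A (Python) =====
-- def suma_wrzystkich_liczb(lista):
--     n = 0
--     u = 1
--     for i in lista[:-1]:
--         for z in lista[u:]:
--             if i != z:
--                 n = n + (i + z)
--         u = u + 1
--     return n
-- ===== SOURCE B (Python) =====
-- def suma_wrzystkich_liczb(lista):
--     counts = {}
--     s = 0
--     for x in lista:
--         counts[x] = counts.get(x, 0) + 1
--         s += x
--     total = (len(lista) - 1) * s
--     for v, c in counts.items():
--         total -= v * c * (c - 1)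
--     return total
-- ===== Notes on version B (the rewrite author's own statement) =====
-- stated objective: faster
-- what changed: Replaced the O(n^2) nested loops over index pairs by one counting pass (dict of value multiplicities plus running sum) and the closed form (n-1)*sum - sum_v v*c_v*(c_v-1).
import Mathlib
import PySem

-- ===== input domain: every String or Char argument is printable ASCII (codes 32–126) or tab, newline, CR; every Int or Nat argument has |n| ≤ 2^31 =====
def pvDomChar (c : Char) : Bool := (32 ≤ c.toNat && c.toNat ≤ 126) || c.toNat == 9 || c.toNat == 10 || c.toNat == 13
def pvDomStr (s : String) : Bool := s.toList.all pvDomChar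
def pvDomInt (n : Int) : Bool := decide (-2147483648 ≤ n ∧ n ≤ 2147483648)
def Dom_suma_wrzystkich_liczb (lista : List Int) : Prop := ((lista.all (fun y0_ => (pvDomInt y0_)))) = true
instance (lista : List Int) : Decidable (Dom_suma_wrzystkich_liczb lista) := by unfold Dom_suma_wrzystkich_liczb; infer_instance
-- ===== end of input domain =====

-- B replaces A's O(n^2) nested pair loops by a single counting pass and the closed form (n-1)*sum - sum_v v*c_v*(c_v-1).


-- ===== PORT A =====
def suma_wrzystkich_liczb (lista : List Int) : Int :=
  ((PySem.List.slice lista none (some (-1))).foldl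
    (fun (st : Int × Int) i =>
      ((PySem.List.slice lista (some st.2) none).foldl
        (fun n z => if i ≠ z then n + (i + z) else n) st.1,
       st.2 + 1))
    (0, 1)).1

-- ===== PORT B =====
def suma_wrzystkich_liczb_alt (lista : List Int) : Int :=
  let st := lista.foldl
    (fun (p : PySem.Dict Int Int × Int) x => (p.1.insert x (p.1.getD x 0 + 1), p.2 + x))
    (PySem.Dict.empty, 0)
  let total := ((lista.length : Int) - 1) * st.2
  st.1.items.foldl (fun t vc => t - vc.1 * vc.2 * (vc.2 - 1)) total

-- ===== PRECONDITION & SPEC =====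
def Spec_suma_wrzystkich_liczb (lista : List Int) (out : Int) : Prop := out = suma_wrzystkich_liczb_alt lista
instance (lista : List Int) (out : Int) : Decidable (Spec_suma_wrzystkich_liczb lista out) := by unfold Spec_suma_wrzystkich_liczb; infer_instance

-- ===== CLAIM (what is proved, stated in full; the proofs are below) =====
def Claim_equal_suma_wrzystkich_liczb : Prop := ∀ (lista : List Int), Dom_suma_wrzystkich_liczb lista → Spec_suma_wrzystkich_liczb lista (suma_wrzystkich_liczb lista)

-- ===== LEMMAS AND PROOFS =====

-- A's inner loop as a sum over the tail's non-equal elements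
def pvPairSum (x : Int) (zs : List Int) : Int :=
  ((zs.filter (fun z => decide (x ≠ z))).map (fun z => x + z)).sum

-- A's algorithm as structural recursion: head paired with tail, then recurse
def pvG : List Int → Int
  | [] => 0
  | x :: xs => pvPairSum x xs + pvG xs

-- the "equal pairs" correction term
def pvE (L : List Int) : Int := (L.map (fun y => y * ((L.count y : Int) - 1))).sum

-- A's outer-loop body, named for the invariant proofs
def pvFA (L : List Int) : Int × Int → Int → Int × Int :=
  fun st i =>
    ((PySem.List.slice L (some st.2) none).foldl
      (fun n z => if i ≠ z then n + (i + z) else n) st.1,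
     st.2 + 1)

lemma pvInner_eq (i : Int) (zs : List Int) (n : Int) :
    zs.foldl (fun n z => if i ≠ z then n + (i + z) else n) n = n + pvPairSum i zs := by
  rw [PySem.List.foldl_ite_eq_foldl_filter (p := fun z => i ≠ z)
        (f := fun n z => n + (i + z)),
      PySem.List.foldl_add (g := fun z => i + z)]
  rfl

lemma pvPairSum_closed (x : Int) (xs : List Int) :
    pvPairSum x xs = xs.sum + (xs.length : Int) * x - 2 * x * (xs.count x : Int) := by
  induction xs with
  | nil => simp [pvPairSum]
  | cons y ys ih =>
    by_cases h : x = y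
    · subst h
      have hstep : pvPairSum x (x :: ys) = pvPairSum x ys := by
        simp [pvPairSum]
      have hc : (x :: ys).count x = ys.count x + 1 := by simp
      rw [hstep, ih, hc, List.sum_cons, List.length_cons]
      push_cast
      ring
    · have hstep : pvPairSum x (y :: ys) = (x + y) + pvPairSum x ys := by
        simp [pvPairSum, h]
      have hc : (y :: ys).count x = ys.count x := by simp [Ne.symm h]
      rw [hstep, ih, hc, List.sum_cons, List.length_cons]
      push_cast
      ring

lemma pv_sum_ite_count (x : Int) (xs : List Int) :
    (xs.map (fun y => y * (if x == y then (1 : Int) else 0))).sum = x * (xs.count x : Int) := by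
  induction xs with
  | nil => simp
  | cons y ys ih =>
    by_cases h : x = y
    · subst h
      have hc : (x :: ys).count x = ys.count x + 1 := by simp
      simp only [List.map_cons, List.sum_cons, beq_self_eq_true, if_true, mul_one, ih, hc]
      push_cast
      ring
    · have hb : (x == y) = false := by simp [h]
      have hc : (y :: ys).count x = ys.count x := by simp [Ne.symm h]
      simp only [List.map_cons, List.sum_cons, hb, Bool.false_eq_true, if_false, mul_zero,
        zero_add, ih, hc]

lemma pvE_cons (x : Int) (xs : List Int) :
    pvE (x :: xs) = pvE xs + 2 * x * (xs.count x : Int) := by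
  unfold pvE
  simp only [List.map_cons, List.sum_cons, List.count_cons, beq_self_eq_true, if_true]
  have hfun : (fun y => y * (((xs.count y + if (x == y) = true then 1 else 0 : Nat) : Int) - 1))
      = fun y => y * ((xs.count y : Int) - 1) + y * (if x == y then (1 : Int) else 0) := by
    funext y
    push_cast
    split <;> ring
  rw [hfun, PySem.List.sum_map_add_int, pv_sum_ite_count]
  push_cast
  ring

lemma pvG_closed (L : List Int) :
    pvG L = ((L.length : Int) - 1) * L.sum - pvE L := by
  induction L with
  | nil => simp [pvG, pvE]
  | cons x xs ih =>
    simp only [pvG]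
    rw [pvPairSum_closed, ih, pvE_cons]
    simp only [List.length_cons, List.sum_cons]
    push_cast
    ring

lemma pvShift (x : Int) (xs : List Int) (ys : List Int) :
    ∀ (n u : Int), 0 ≤ u →
      ys.foldl (pvFA (x :: xs)) (n, u + 1)
        = ((ys.foldl (pvFA xs) (n, u)).1, (ys.foldl (pvFA xs) (n, u)).2 + 1) := by
  induction ys with
  | nil => intro n u _; rfl
  | cons i ys ih =>
    intro n u hu
    simp only [List.foldl_cons]
    have hs : PySem.List.slice (x :: xs) (some (u + 1)) none
        = PySem.List.slice xs (some u) none := by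
      rw [PySem.List.slice_from (x :: xs) (by omega), PySem.List.slice_from xs hu]
      have ht : (u + 1).toNat = u.toNat + 1 := by omega
      rw [ht]
      rfl
    have hstep : pvFA (x :: xs) (n, u + 1) i
        = ((pvFA xs (n, u) i).1, (pvFA xs (n, u) i).2 + 1) := by
      simp only [pvFA, hs]
    rw [hstep]
    have h2 : 0 ≤ (pvFA xs (n, u) i).2 := by
      simp only [pvFA]; omega
    have := ih (pvFA xs (n, u) i).1 (pvFA xs (n, u) i).2 h2
    simpa using this

lemma pvMain (L : List Int) : ∀ n : Int,
    ((L.dropLast).foldl (pvFA L) (n, 1)).1 = n + pvG L := by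
  induction L with
  | nil => intro n; simp [pvG]
  | cons x xs ih =>
    intro n
    cases xs with
    | nil => simp [pvG, pvPairSum]
    | cons y ys =>
      rw [List.dropLast_cons₂]
      simp only [List.foldl_cons]
      have h1 : pvFA (x :: y :: ys) (n, 1) x = (n + pvPairSum x (y :: ys), 1 + 1) := by
        simp only [pvFA]
        rw [PySem.List.slice_from_one]
        rw [pvInner_eq]
        rfl
      rw [h1]
      have h2 := pvShift x (y :: ys) ((y :: ys).dropLast) (n + pvPairSum x (y :: ys)) 1
        (by norm_num)
      rw [h2]
      dsimp only
      rw [ih]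
      simp only [pvG]
      ring

lemma pvA_eq (L : List Int) : suma_wrzystkich_liczb L = pvG L := by
  unfold suma_wrzystkich_liczb
  rw [PySem.List.slice_to_neg_one]
  have h := pvMain L 0
  rw [zero_add] at h
  exact h

lemma pvFoldl_sub (g : Int × Int → Int) (l : List (Int × Int)) : ∀ t : Int,
    l.foldl (fun t vc => t - g vc) t = t - (l.map g).sum := by
  induction l with
  | nil => intro t; simp
  | cons a l ih =>
    intro t
    simp only [List.foldl_cons, List.map_cons, List.sum_cons, ih]
    ring

lemma pvSet_sum_eq_pvE (L : List Int) :
    ((PySem.Set.ofList L).map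
      (fun k => k * (L.count k : Int) * ((L.count k : Int) - 1))).sum = pvE L := by
  have hnd : (PySem.Set.ofList L).Nodup := PySem.Set.nodup_ofList L
  have htf : (PySem.Set.ofList L).toFinset = L.toFinset := by
    ext a
    simp [List.mem_toFinset, PySem.Set.mem_ofList]
  rw [← List.sum_toFinset _ hnd, htf]
  unfold pvE
  rw [Finset.sum_list_map_count]
  refine Finset.sum_congr rfl ?_
  intro m _
  rw [nsmul_eq_mul]
  ring

lemma pvB_closed (L : List Int) :
    suma_wrzystkich_liczb_alt L = ((L.length : Int) - 1) * L.sum - pvE L := by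
  have hz : suma_wrzystkich_liczb_alt L
      = (L.foldl
          (fun (p : PySem.Dict Int Int × Int) x => (p.1.insert x (p.1.getD x 0 + 1), p.2 + x))
          (PySem.Dict.empty, 0)).1.items.foldl
          (fun t vc => t - vc.1 * vc.2 * (vc.2 - 1))
          (((L.length : Int) - 1) *
            (L.foldl
              (fun (p : PySem.Dict Int Int × Int) x => (p.1.insert x (p.1.getD x 0 + 1), p.2 + x))
              (PySem.Dict.empty, 0)).2) := rfl
  rw [hz, PySem.List.foldl_prod_mk
        (f := fun (d : PySem.Dict Int Int) x => d.insert x (d.getD x 0 + 1))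
        (g := fun (s : Int) x => s + x)]
  dsimp only
  rw [PySem.Dict.foldl_insert_getD_add_one_eq_counter,
      PySem.List.foldl_add (g := fun z : Int => z),
      pvFoldl_sub, PySem.Dict.items_counter, List.map_map]
  simp only [Function.comp_def]
  rw [pvSet_sum_eq_pvE]
  simp only [List.map_id', zero_add]

-- ===== VERDICT (by name: the statement is the Claim_ definition above) =====
theorem suma_wrzystkich_liczb_spec : Claim_equal_suma_wrzystkich_liczb := by
  intro lista _
  unfold Spec_suma_wrzystkich_liczb
  rw [pvA_eq, pvG_closed, pvB_closed]
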